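-- pv_equiv track=rewrite | github.com/walklikeaman/kitpos | agents/kit-dashboard-agent/src/kit_agent/parsers/ocr_micr.py | is_valid_aba_routing_number
-- ===== SOURCE A (Python) =====
-- def is_valid_aba_routing_number(routing: str) -> bool:
--     """
--     Validate ABA routing number using checksum algorithm.
--     Routing numbers are 9 digits with a specific checksum.
--     """
--     if not routing or len(routing) != 9 or not routing.isdigit():
--         return False
--
--     # Checksum: sum((d[0] + d[3] + d[6]) * 3 + (d[1] + d[4] + d[7]) * 7 + (d[2] + d[5] + d[8]) * 1) % 10 == 0
--     digits = [int(d) for d in routing]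
--     checksum = (
--         (digits[0] + digits[3] + digits[6]) * 3 +
--         (digits[1] + digits[4] + digits[7]) * 7 +
--         (digits[2] + digits[5] + digits[8]) * 1
--     ) % 10
--
--     return checksum == 0
-- ===== SOURCE B (Python) =====
-- # Table-driven recursive validator: a running residue mod 10 is threaded through a
-- # recursion over the characters, with one precomputed lookup table per weight and
-- # the table queue rotated at each step (no per-digit multiplication, no digit list).
-- _W3 = (0, 3, 6, 9, 2, 5, 8, 1, 4, 7)   # (d * 3) % 10
-- _W7 = (0, 7, 4, 1, 8, 5, 2, 9, 6, 3)   # (d * 7) % 10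
-- _W1 = (0, 1, 2, 3, 4, 5, 6, 7, 8, 9)   # (d * 1) % 10
--
--
-- def _aba_residue(chars, tables, state):
--     if not chars:
--         return state
--     return _aba_residue(
--         chars[1:],
--         tables[1:] + tables[:1],
--         (state + tables[0][ord(chars[0]) - 48]) % 10,
--     )
--
--
-- def is_valid_aba_routing_number(routing: str) -> bool:
--     if not routing or len(routing) != 9 or not routing.isdigit():
--         return False
--     return _aba_residue(routing, (_W3, _W7, _W1), 0) == 0
-- ===== Notes on version B (the rewrite author's own statement) =====
-- stated objective: alternative
-- what changed: Replaced A's build-a-digit-list + three position-grouped sums + one final mod with a recursive mod-10 state machine: one precomputed lookup table per weight indexed by ord(ch)-48 (no multiplication, no int() per char), a rotating table queue instead of positional indexing, and a running residue reduced mod 10 at every step.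
import Mathlib
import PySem

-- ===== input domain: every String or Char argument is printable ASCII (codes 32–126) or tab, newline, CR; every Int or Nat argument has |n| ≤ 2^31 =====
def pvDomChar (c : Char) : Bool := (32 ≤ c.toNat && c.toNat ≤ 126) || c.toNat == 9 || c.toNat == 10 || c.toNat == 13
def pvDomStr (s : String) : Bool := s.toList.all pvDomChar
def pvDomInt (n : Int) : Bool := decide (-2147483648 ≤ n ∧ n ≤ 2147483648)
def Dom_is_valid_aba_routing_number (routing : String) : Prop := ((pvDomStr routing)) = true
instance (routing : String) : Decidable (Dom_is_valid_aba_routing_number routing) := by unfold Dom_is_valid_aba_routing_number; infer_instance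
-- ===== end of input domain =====

-- B replaces A's digit-list + three position-grouped sums + final mod with a
-- recursive mod-10 state machine over the characters: a lookup table per weight
-- (indexed by ord(ch)-48), a rotating table queue, and a running residue;
-- objective: alternative (same O(1) cost over the fixed 9 digits).


-- ===== PORT A =====
-- int(d) for a single character d (the guard guarantees d is a digit, so getD 0 is unreachable)
def pvDigitA (c : Char) : Int := (PySem.Int.ofChars? [c]).getD 0

def is_valid_aba_routing_number (routing : String) : Bool :=
  if routing.toList.isEmpty || !(PySem.Str.len routing == 9) || !(PySem.Str.strIsdigit routing) then
    false
  else
    let digits := routing.toList.map pvDigitA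
    -- digits[i] for literal i; in range by the length-9 guard
    let g := fun (i : Int) => PySem.List.pyGetD digits i 0
    let checksum := PySem.Int.mod
      ((g 0 + g 3 + g 6) * 3 + (g 1 + g 4 + g 7) * 7 + (g 2 + g 5 + g 8) * 1) 10
    checksum == 0

-- ===== PORT B =====
-- the module-level tables _W3, _W7, _W1: (d * w) % 10 for d = 0..9
def pvAbaW3 : List Int := [0, 3, 6, 9, 2, 5, 8, 1, 4, 7]
def pvAbaW7 : List Int := [0, 7, 4, 1, 8, 5, 2, 9, 6, 3]
def pvAbaW1 : List Int := [0, 1, 2, 3, 4, 5, 6, 7, 8, 9]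

-- _aba_residue(chars, tables, state): 'if not chars: return state' is the [] case;
-- chars[1:] is the tail, tables[1:] + tables[:1] the slice rotation, tables[0] a
-- pyGetD at 0 (its IndexError default is unreachable: tables is never empty),
-- ord(chars[0]) - 48 is c.toNat - 48 (exact: ord = code point).
def pvAbaResidue : List Char → List (List Int) → Int → Int
  | [], _, state => state
  | c :: rest, tables, state =>
      pvAbaResidue rest (tables.drop 1 ++ tables.take 1)
        (PySem.Int.mod
          (state + PySem.List.pyGetD (PySem.List.pyGetD tables 0 []) ((c.toNat : Int) - 48) 0) 10)

def is_valid_aba_routing_number_alt (routing : String) : Bool :=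
  if routing.toList.isEmpty || !(PySem.Str.len routing == 9) || !(PySem.Str.strIsdigit routing) then
    false
  else
    pvAbaResidue routing.toList [pvAbaW3, pvAbaW7, pvAbaW1] 0 == 0

-- ===== PRECONDITION & SPEC =====
def Spec_is_valid_aba_routing_number (routing : String) (out : Bool) : Prop := out = is_valid_aba_routing_number_alt routing
instance (routing : String) (out : Bool) : Decidable (Spec_is_valid_aba_routing_number routing out) := by unfold Spec_is_valid_aba_routing_number; infer_instance

-- ===== CLAIM =====
def Claim_equal_is_valid_aba_routing_number : Prop := ∀ (routing : String), Dom_is_valid_aba_routing_number routing → Spec_is_valid_aba_routing_number routing (is_valid_aba_routing_number routing)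

-- ===== LEMMAS AND PROOFS =====

-- a digit character's code point lies in [48, 57]
theorem pvIsdigit_bounds (c : Char) (h : PySem.Chars.isdigit c = true) :
    48 ≤ c.toNat ∧ c.toNat ≤ 57 := by
  simp only [PySem.Chars.isdigit, Bool.and_eq_true, decide_eq_true_eq, Char.le_def] at h
  exact ⟨UInt32.le_iff_toNat_le.mp h.1, UInt32.le_iff_toNat_le.mp h.2⟩

-- int(d) of a digit character is its code point minus 48
theorem pvDigitA_eq (c : Char) (h : PySem.Chars.isdigit c = true) :
    pvDigitA c = (c.toNat : Int) - 48 := by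
  obtain ⟨h1, h2⟩ := pvIsdigit_bounds c h
  have hc : Char.ofNat c.toNat = c := Char.ofNat_toNat c
  unfold pvDigitA
  rw [← hc]
  set n := c.toNat with hn
  clear_value n
  interval_cases n <;> decide

-- each table tabulates (d * w) % 10 on 0 ≤ d ≤ 9
theorem pvW3_lookup (d : Int) (h1 : 0 ≤ d) (h2 : d ≤ 9) :
    PySem.List.pyGetD pvAbaW3 d 0 = PySem.Int.mod (d * 3) 10 := by
  interval_cases d <;> decide

theorem pvW7_lookup (d : Int) (h1 : 0 ≤ d) (h2 : d ≤ 9) :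
    PySem.List.pyGetD pvAbaW7 d 0 = PySem.Int.mod (d * 7) 10 := by
  interval_cases d <;> decide

theorem pvW1_lookup (d : Int) (h1 : 0 ≤ d) (h2 : d ≤ 9) :
    PySem.List.pyGetD pvAbaW1 d 0 = PySem.Int.mod (d * 1) 10 := by
  interval_cases d <;> decide

-- ===== VERDICT =====
theorem is_valid_aba_routing_number_spec : Claim_equal_is_valid_aba_routing_number := by
  intro routing _
  unfold Spec_is_valid_aba_routing_number is_valid_aba_routing_number is_valid_aba_routing_number_alt
  split_ifs with h
  · rfl
  · -- the guard failed: length is 9 and every character is a digit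
    push Not at h
    have hlen : routing.toList.length = 9 := by
      by_contra hne
      apply h
      have hne' : routing.length ≠ 9 := by
        rw [← String.length_toList]; exact hne
      simp
      exact Or.inl (Or.inr (by exact_mod_cast hne'))
    have hdig : PySem.Chars.strIsdigit routing.toList = true := by
      by_contra hd
      exact h (by simp [PySem.Str.strIsdigit_eq] at hd ⊢; tauto)
    obtain ⟨c0, c1, c2, c3, c4, c5, c6, c7, c8, hl⟩ :
        ∃ c0 c1 c2 c3 c4 c5 c6 c7 c8,
          routing.toList = [c0, c1, c2, c3, c4, c5, c6, c7, c8] := by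
      match hm : routing.toList, hlen with
      | [c0, c1, c2, c3, c4, c5, c6, c7, c8], _ =>
        exact ⟨c0, c1, c2, c3, c4, c5, c6, c7, c8, rfl⟩
    rw [hl] at hdig
    simp only [PySem.Chars.strIsdigit, List.all_cons, List.all_nil, Bool.and_eq_true,
      List.isEmpty_cons, Bool.not_false, Bool.true_and, Bool.and_true] at hdig
    obtain ⟨d0, d1, d2, d3, d4, d5, d6, d7, d8⟩ := hdig
    rw [hl]
    -- A side: each digits[i] is the character's value
    simp only [List.map_cons, List.map_nil, PySem.List.pyGetD_ofNat', List.getD_cons_zero, List.getD_cons_succ]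
    rw [pvDigitA_eq _ d0, pvDigitA_eq _ d1, pvDigitA_eq _ d2, pvDigitA_eq _ d3,
      pvDigitA_eq _ d4, pvDigitA_eq _ d5, pvDigitA_eq _ d6, pvDigitA_eq _ d7, pvDigitA_eq _ d8]
    -- B side: unfold the nine recursion steps and the table lookups
    simp only [pvAbaResidue, List.drop_succ_cons, List.drop_zero, List.take_succ_cons,
      List.take_zero, List.nil_append, List.cons_append, PySem.List.pyGetD_ofNat', List.getD_cons_zero]
    obtain ⟨l0, u0⟩ := pvIsdigit_bounds _ d0
    obtain ⟨l1, u1⟩ := pvIsdigit_bounds _ d1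
    obtain ⟨l2, u2⟩ := pvIsdigit_bounds _ d2
    obtain ⟨l3, u3⟩ := pvIsdigit_bounds _ d3
    obtain ⟨l4, u4⟩ := pvIsdigit_bounds _ d4
    obtain ⟨l5, u5⟩ := pvIsdigit_bounds _ d5
    obtain ⟨l6, u6⟩ := pvIsdigit_bounds _ d6
    obtain ⟨l7, u7⟩ := pvIsdigit_bounds _ d7
    obtain ⟨l8, u8⟩ := pvIsdigit_bounds _ d8
    rw [pvW3_lookup _ (by omega) (by omega), pvW7_lookup _ (by omega) (by omega),
      pvW1_lookup _ (by omega) (by omega), pvW3_lookup _ (by omega) (by omega),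
      pvW7_lookup _ (by omega) (by omega), pvW1_lookup _ (by omega) (by omega),
      pvW3_lookup _ (by omega) (by omega), pvW7_lookup _ (by omega) (by omega),
      pvW1_lookup _ (by omega) (by omega)]
    -- both sides are now arithmetic mod 10: reduce fmod to emod and close by omega
    have key : ∀ a : Int, PySem.Int.mod a 10 = a % 10 := fun a => by
      simp [PySem.Int.mod, Int.fmod_eq_emod]
    simp only [key]
    congr 1
    omega
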